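-- pv_equiv track=rewrite | github.com/utra-robosoccer/soccerbot | soccer_hardware_bez3/src/soccer_hardware/motor_util.py | un6pack
-- ===== SOURCE A (Python) =====
-- def un6pack(bs, _signed=True):
--     # little-endian
--     c = 0
--     for i, b in enumerate(bs):
--         c |= (b & 0x3F) << (i * 6)
--
--     if _signed:
--         sign_bit = 1 << (len(bs) * 6 - 1)
--         if c & sign_bit:
--             c -= sign_bit << 1
--
--     return c
-- ===== SOURCE B (Python) =====
-- def un6pack(bs, _signed=True):
--     # Divide-and-conquer: combine the base-64 values of the two halves;
--     # modular arithmetic (% 64) instead of masking, comparison instead of bit test.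
--     def value(lo, hi):
--         if hi - lo == 0:
--             return 0
--         if hi - lo == 1:
--             return bs[lo] % 64
--         mid = (lo + hi) // 2
--         return value(lo, mid) + value(mid, hi) * 64 ** (mid - lo)
--
--     c = value(0, len(bs))
--     if _signed and bs[-1] % 64 >= 32:
--         c -= 64 ** len(bs)
--     return c
-- ===== Notes on version B (the rewrite author's own statement) =====
-- stated objective: faster
-- what changed: Replaces A's single linear pass of shift-and-OR bit operations (shifting the i-th chunk by i*6 bits builds ever-larger bignums) by a divide-and-conquer recursion on index ranges that combines the base-64 values of the two halves with one multiply/add, takes chunks with % 64 instead of & 0x3F, and decides the sign by comparing the top chunk with 32 instead of AND-ing a sign-bit mask.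
-- outside the precondition, e.g. on un6pack([], True): A raises ValueError, B raises IndexError
import Mathlib
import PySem

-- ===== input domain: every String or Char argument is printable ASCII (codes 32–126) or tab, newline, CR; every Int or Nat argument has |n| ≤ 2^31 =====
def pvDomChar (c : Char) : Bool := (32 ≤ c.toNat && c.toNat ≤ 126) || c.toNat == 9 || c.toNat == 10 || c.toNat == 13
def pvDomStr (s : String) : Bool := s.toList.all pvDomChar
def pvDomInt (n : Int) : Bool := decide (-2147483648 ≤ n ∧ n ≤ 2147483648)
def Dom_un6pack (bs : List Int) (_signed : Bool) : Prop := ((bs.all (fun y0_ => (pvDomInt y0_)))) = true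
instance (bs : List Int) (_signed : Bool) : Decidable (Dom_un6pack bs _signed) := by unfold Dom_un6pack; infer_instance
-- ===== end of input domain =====

-- B replaces A's linear shift-and-OR loop by a divide-and-conquer recursion on index ranges
-- (chunks taken with % 64, sign decided by comparing the top chunk with 32); measured faster on large inputs (balanced bignum work).

-- ===== PORT A =====
-- A's loop: c |= (b & 0x3F) << (i*6) over enumerate(bs); enumerate indices are ≥ 0, so .toNat on the shift amount is exact
def un6packCoreA (bs : List Int) : Int :=
  (PySem.List.enumerate bs 0).foldl
    (fun c p => PySem.Int.bor c ((PySem.Int.band p.2 63) <<< ((p.1 * 6).toNat))) 0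

def un6pack (bs : List Int) (_signed : Bool) : Int :=
  let c := un6packCoreA bs
  if _signed then
    -- Python's 1 << (len(bs)*6 - 1): for bs = [] this raises ValueError (excluded by Pre_)
    let signBit : Int := (1 : Int) <<< (bs.length * 6 - 1)
    if PySem.Int.band c signBit ≠ 0 then c - (signBit <<< 1) else c
  else c

-- ===== PORT B =====
-- B's recursion value(lo, hi): base-64 value of bs[lo:hi]; bs[lo] is always in range
-- when called from un6pack_alt, so '.getD 0' is exact there
-- fuel = size of the index range, a totality guard only (never reached: each half is
-- strictly smaller, so 'fuel = hi - lo' always suffices); kernel-reducible structural recursion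
def un6packValB (bs : List Int) : Nat → Nat → Nat → Int
  | 0, _, _ => 0
  | fuel + 1, lo, hi =>
    if hi - lo = 0 then 0
    else if hi - lo = 1 then PySem.Int.mod ((PySem.List.pyGet? bs (lo : Int)).getD 0) 64
    else
      let mid := (lo + hi) / 2
      un6packValB bs fuel lo mid + un6packValB bs fuel mid hi * 64 ^ (mid - lo)

def un6pack_alt (bs : List Int) (_signed : Bool) : Int :=
  let c := un6packValB bs bs.length 0 bs.length
  -- Python 'bs[-1]' raises IndexError on empty bs (excluded by Pre_); '.getD 0' stands for that access
  if _signed then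
    if 32 ≤ PySem.Int.mod ((PySem.List.pyGet? bs (-1)).getD 0) 64 then c - 64 ^ bs.length else c
  else c

-- ===== PRECONDITION & SPEC =====
-- Pre_ excludes only bs = [] with _signed = True, where A raises ValueError ('1 << -1') and B raises IndexError (bs[-1]).
def Pre_un6pack (bs : List Int) (_signed : Bool) : Prop := bs ≠ [] ∨ _signed = false
instance (bs : List Int) (_signed : Bool) : Decidable (Pre_un6pack bs _signed) := by unfold Pre_un6pack; infer_instance
def pvWitness_un6pack : List Int × Bool := ([1, -2, 63], true)

def Spec_un6pack (bs : List Int) (_signed : Bool) (out : Int) : Prop := out = un6pack_alt bs _signed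
instance (bs : List Int) (_signed : Bool) (out : Int) : Decidable (Spec_un6pack bs _signed out) := by unfold Spec_un6pack; infer_instance

-- ===== CLAIM =====
def Claim_equal_un6pack : Prop := ∀ (bs : List Int) (_signed : Bool), Dom_un6pack bs _signed → Pre_un6pack bs _signed → Spec_un6pack bs _signed (un6pack bs _signed)

-- ===== LEMMAS AND PROOFS =====

-- the little-endian base-64 value of the masked bytes (the common value of both programs' accumulations)
def pvV : List Int → Int
  | [] => 0
  | b :: t => PySem.Int.band b 63 + 64 * pvV t

theorem pv_shl_int (a : Int) (k : Nat) : a <<< ((k : Nat) : Int) = a * 2 ^ k := by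
  exact_mod_cast Int.shiftLeft_eq_mul_pow a k

theorem pv_band63_bounds (b : Int) : 0 ≤ PySem.Int.band b 63 ∧ PySem.Int.band b 63 < 64 := by
  unfold PySem.Int.band
  simp only [show ((63:Int)).toNat = 63 from rfl]
  split_ifs with h1 h2 h2
  · have : b.toNat &&& 63 ≤ 63 := Nat.and_le_right
    constructor
    · positivity
    · exact_mod_cast by omega
  · omega
  · have : 63 - (63 &&& (-b-1).toNat) ≤ 63 := Nat.sub_le _ _
    constructor
    · positivity
    · exact_mod_cast by omega
  · omega

-- Python's b & 0x3F and b % 64 agree on every int (64 is a power of two)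
theorem pv_band63_eq_mod (b : Int) : PySem.Int.band b 63 = PySem.Int.mod b 64 := by
  rw [PySem.Int.mod_eq_emod_of_pos (by norm_num)]
  unfold PySem.Int.band
  simp only [show ((63:Int)).toNat = 63 from rfl]
  have hand : ∀ m : Nat, m &&& 63 = m % 64 := fun m => Nat.and_two_pow_sub_one_eq_mod m 6
  split_ifs with h1 h2 h2
  · rw [hand]; omega
  · omega
  · rw [Nat.and_comm, hand]
    have h64 : (-b-1).toNat % 64 < 64 := Nat.mod_lt _ (by norm_num)
    omega
  · omega

theorem pvV_nonneg (bs : List Int) : 0 ≤ pvV bs := by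
  induction bs with
  | nil => simp [pvV]
  | cons b t ih =>
    have := pv_band63_bounds b
    simp only [pvV]; omega

theorem pvV_lt (bs : List Int) : pvV bs < 64 ^ bs.length := by
  induction bs with
  | nil => simp [pvV]
  | cons b t ih =>
    have := pv_band63_bounds b
    simp only [pvV, List.length_cons, pow_succ]
    nlinarith

theorem pvV_append (xs ys : List Int) : pvV (xs ++ ys) = pvV xs + 64 ^ xs.length * pvV ys := by
  induction xs with
  | nil => simp [pvV]
  | cons x t ih =>
    simp only [List.cons_append, pvV, ih, List.length_cons, pow_succ]
    ring

-- disjoint OR is addition: (a * 2^k) | x = a * 2^k + x  when 0 ≤ a, 0 ≤ x < 2^k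
theorem pv_bor_mul (a x : Int) (k : Nat) (ha : 0 ≤ a) (hx0 : 0 ≤ x) (hx : x < 2 ^ k) :
    PySem.Int.bor (a * 2 ^ k) x = a * 2 ^ k + x := by
  obtain ⟨m, rfl⟩ := Int.eq_ofNat_of_zero_le ha
  obtain ⟨n, rfl⟩ := Int.eq_ofNat_of_zero_le hx0
  have hn : n < 2 ^ k := by exact_mod_cast hx
  have h1 : ((m : Int) * 2 ^ k) = ((m <<< k : Nat) : Int) := by
    rw [Nat.shiftLeft_eq]; push_cast; ring
  rw [h1, PySem.Int.bor_natCast, ← Nat.shiftLeft_add_eq_or_of_lt hn, Nat.shiftLeft_eq]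
  push_cast; ring

-- A's fold over enumerate computes pvV
theorem pv_foldA (bs : List Int) : ∀ (s : Nat) (acc : Int), 0 ≤ acc → acc < 2 ^ (6 * s) →
    (PySem.List.enumerate bs (s : Int)).foldl
      (fun c p => PySem.Int.bor c ((PySem.Int.band p.2 63) <<< (((p.1 * 6).toNat : Nat) : Int))) acc
      = acc + 2 ^ (6 * s) * pvV bs := by
  induction bs with
  | nil => intro s acc _ _; simp [PySem.List.enumerate_nil, pvV]
  | cons b t ih =>
    intro s acc hacc hlt
    have hb := pv_band63_bounds b
    rw [PySem.List.enumerate_cons]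
    simp only [List.foldl_cons]
    have hcast : (((s : Int)) * 6).toNat = 6 * s := by omega
    have hstep : PySem.Int.bor acc ((PySem.Int.band b 63) <<< (((((s : Int)) * 6).toNat : Nat) : Int))
        = acc + PySem.Int.band b 63 * 2 ^ (6 * s) := by
      rw [pv_shl_int, hcast, PySem.Int.bor_comm,
        pv_bor_mul _ _ (6 * s) hb.1 hacc hlt]
      ring
    have hpow : (2:Int) ^ (6 * (s + 1)) = 64 * 2 ^ (6 * s) := by
      rw [show 6 * (s + 1) = 6 * s + 6 by ring, pow_add]; ring
    have hs1 : ((s : Int) + 1) = ((s + 1 : Nat) : Int) := by push_cast; ring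
    rw [hstep, hs1, ih (s + 1) _ (by nlinarith [hb.1]) (by rw [hpow]; nlinarith [hb.2, hlt])]
    simp only [pvV]; rw [hpow]; ring

theorem pv_coreA_eq (bs : List Int) : un6packCoreA bs = pvV bs := by
  unfold un6packCoreA
  have hA := pv_foldA bs 0 0 le_rfl (by norm_num)
  simp only [Nat.mul_zero, pow_zero, Nat.cast_zero] at hA
  rw [hA]; ring

-- B's divide-and-conquer computes pvV of the slice (any sufficient fuel)
theorem pv_valB_eq (bs : List Int) : ∀ (fuel lo hi : Nat), hi - lo ≤ fuel → lo ≤ hi → hi ≤ bs.length →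
    un6packValB bs fuel lo hi = pvV ((bs.drop lo).take (hi - lo)) := by
  intro fuel
  induction fuel with
  | zero =>
    intro lo hi hn _ _
    simp [un6packValB, show hi - lo = 0 from by omega, pvV]
  | succ f ih =>
    intro lo hi hn hlh hhi
    rw [un6packValB]
    split_ifs with h0 h1
    · simp [show hi - lo = 0 from h0, pvV]
    · have hlo : lo < bs.length := by omega
      have hdrop : bs.drop lo = bs[lo] :: bs.drop (lo + 1) := List.drop_eq_getElem_cons hlo
      rw [hdrop, show hi - lo = 1 from h1]
      simp only [List.take_succ_cons, List.take_zero, pvV]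
      rw [PySem.List.pyGet?_natCast]
      simp only [List.getElem?_eq_getElem hlo, Option.getD_some]
      rw [pv_band63_eq_mod]; ring
    · have h2 : 2 ≤ hi - lo := by omega
      have hmid1 : lo < (lo + hi) / 2 := by omega
      have hmid2 : (lo + hi) / 2 < hi := by omega
      show un6packValB bs f lo ((lo + hi) / 2) + un6packValB bs f ((lo + hi) / 2) hi * 64 ^ ((lo + hi) / 2 - lo)
          = pvV ((bs.drop lo).take (hi - lo))
      rw [ih lo ((lo + hi) / 2) (by omega) (by omega) (by omega),
          ih ((lo + hi) / 2) hi (by omega) (by omega) hhi]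
      have hsplit : (bs.drop lo).take (hi - lo)
          = (bs.drop lo).take ((lo + hi) / 2 - lo) ++ ((bs.drop ((lo + hi) / 2)).take (hi - (lo + hi) / 2)) := by
        rw [show hi - lo = ((lo + hi) / 2 - lo) + (hi - (lo + hi) / 2) by omega, List.take_add,
            List.drop_drop, show lo + ((lo + hi) / 2 - lo) = (lo + hi) / 2 from by omega]
      rw [hsplit, pvV_append]
      have hlen : ((bs.drop lo).take ((lo + hi) / 2 - lo)).length = (lo + hi) / 2 - lo := by
        simp only [List.length_take, List.length_drop]; omega
      rw [hlen]; ring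

theorem pv_altCore_eq (bs : List Int) : un6packValB bs bs.length 0 bs.length = pvV bs := by
  rw [pv_valB_eq bs bs.length 0 bs.length (by omega) (by omega) le_rfl]
  simp

-- the top bit of a Nat below 2^(k+1) is set iff the value reaches 2^k
theorem pv_nat_and_top (c k : Nat) (h : c < 2 ^ (k + 1)) : (c &&& 2 ^ k ≠ 0) ↔ 2 ^ k ≤ c := by
  rw [Nat.and_two_pow]
  rcases lt_or_ge c (2 ^ k) with hc | hc
  · rw [Nat.testBit_lt_two_pow hc]
    simp; omega
  · rw [Nat.testBit_of_two_pow_le_and_two_pow_add_one_gt hc h]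
    have : 0 < 2 ^ k := Nat.two_pow_pos k
    simp; omega

-- A's sign-bit test on pvV bs ↔ B's top-chunk comparison
theorem pv_sign_iff (bs : List Int) (h : bs ≠ []) :
    (PySem.Int.band (pvV bs) ((1 : Int) <<< (bs.length * 6 - 1)) ≠ 0)
      ↔ 32 ≤ PySem.Int.mod (bs.getLast h) 64 := by
  have hsplit := List.dropLast_append_getLast h
  set xs := bs.dropLast with hxs
  set L := bs.getLast h with hL
  have hlen : bs.length = xs.length + 1 := by
    rw [← hsplit]; simp
  have hVdec : pvV bs = pvV xs + 64 ^ xs.length * PySem.Int.band L 63 := by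
    conv_lhs => rw [← hsplit]
    rw [pvV_append]; simp [pvV]
  have hxlt := pvV_lt xs
  have hxnn := pvV_nonneg xs
  have hLb := pv_band63_bounds L
  have hcnn : 0 ≤ pvV bs := pvV_nonneg bs
  -- rewrite everything through Nat
  have hk : bs.length * 6 - 1 = 6 * xs.length + 5 := by omega
  have hshift : ((1 : Int) <<< (bs.length * 6 - 1)) = ((2 ^ (6 * xs.length + 5) : Nat) : Int) := by
    rw [hk, Int.shiftLeft_eq]; push_cast; ring
  have hpow64 : ((64 : Int) ^ xs.length) = ((2 : Int) ^ (6 * xs.length)) := by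
    rw [show ((64:Int)) = 2 ^ 6 by norm_num, ← pow_mul]
  have hclt : pvV bs < 2 ^ (6 * xs.length + 5 + 1) := by
    have := pvV_lt bs
    calc pvV bs < 64 ^ bs.length := this
      _ = 2 ^ (6 * xs.length + 5 + 1) := by
          rw [hlen, show ((64:Int)) = 2 ^ 6 by norm_num, ← pow_mul]
          ring_nf
  obtain ⟨m, hm⟩ := Int.eq_ofNat_of_zero_le hcnn
  rw [hshift, hm, PySem.Int.band_natCast]
  have hmlt : m < 2 ^ (6 * xs.length + 5 + 1) := by
    rw [hm] at hclt; exact_mod_cast hclt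
  have htop := pv_nat_and_top m (6 * xs.length + 5) hmlt
  rw [← pv_band63_eq_mod]
  constructor
  · intro hne
    have : 2 ^ (6 * xs.length + 5) ≤ m := htop.mp (by exact_mod_cast hne)
    have hge : ((2 ^ (6 * xs.length + 5) : Nat) : Int) ≤ pvV bs := by
      rw [hm]; exact_mod_cast this
    by_contra hlt
    rw [not_le] at hlt
    have : pvV bs < ((2 ^ (6 * xs.length + 5) : Nat) : Int) := by
      rw [hVdec]
      push_cast
      have h2 : ((2:Int)) ^ (6 * xs.length + 5) = 32 * 64 ^ xs.length := by
        rw [hpow64, pow_add, show ((2:Int) ^ 5) = 32 from by norm_num]; ring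
      rw [h2]
      nlinarith
    omega
  · intro h32
    have hge : ((2 ^ (6 * xs.length + 5) : Nat) : Int) ≤ pvV bs := by
      rw [hVdec]
      push_cast
      have h2 : ((2:Int)) ^ (6 * xs.length + 5) = 32 * 64 ^ xs.length := by
        rw [hpow64, pow_add, show ((2:Int) ^ 5) = 32 from by norm_num]; ring
      rw [h2]
      nlinarith
    have : 2 ^ (6 * xs.length + 5) ≤ m := by
      rw [hm] at hge; exact_mod_cast hge
    have := htop.mpr this
    exact_mod_cast this

theorem pv_signbit_shl (bs : List Int) (h : bs ≠ []) :
    ((1 : Int) <<< (bs.length * 6 - 1)) <<< 1 = 64 ^ bs.length := by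
  have hn : 1 ≤ bs.length := List.length_pos_iff.mpr h
  have h2 : ∀ a : Int, a <<< (1 : Int) = a * 2 ^ 1 := fun a => by
    exact_mod_cast Int.shiftLeft_eq_mul_pow a 1
  rw [Int.shiftLeft_eq, h2]
  rw [show ((64:Int)) = 2 ^ 6 by norm_num, ← pow_mul, one_mul, pow_one, ← pow_succ]
  congr 1
  omega

-- ===== VERDICT =====
theorem un6pack_spec : Claim_equal_un6pack := by
  intro bs s _ hpre
  unfold Spec_un6pack un6pack un6pack_alt
  cases s with
  | false => simp [pv_coreA_eq, pv_altCore_eq]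
  | true =>
    have hne : bs ≠ [] := by
      rcases hpre with h | h
      · exact h
      · cases h
    simp only [if_true]
    rw [pv_coreA_eq, pv_altCore_eq, pv_signbit_shl bs hne,
        PySem.List.pyGet?_neg_one, List.getLast?_eq_getLast_of_ne_nil hne, Option.getD_some]
    have hiff := pv_sign_iff bs hne
    by_cases hc : 32 ≤ PySem.Int.mod (bs.getLast hne) 64
    · rw [if_pos (hiff.mpr hc), if_pos hc]
    · rw [if_neg (fun hx => hc (hiff.mp hx)), if_neg hc]
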